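-- pv_equiv track=rewrite | github.com/yashrocky888/GuruSuite | apps/guru-api/src/interpretation/nlg_formatter.py | format_remedies
-- ===== SOURCE A (Python) =====
-- from typing import Dict, List
--
-- def format_remedies(remedy_list: Dict) -> str:
--     """
--     Phase 18: Format remedies section.
--
--     Args:
--         remedy_list: Remedies dictionary
--
--     Returns:
--         Formatted text
--     """
--     text = """
-- ═══════════════════════════════════════════════════════════
-- REMEDIES & RECOMMENDATIONS
-- ═══════════════════════════════════════════════════════════
--
-- """
--
--     # Gemstones
--     gemstones = remedy_list.get('gemstones', [])
--     if gemstones: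
--         text += "GEMSTONES:\n"
--         for gem in gemstones:
--             text += f"• {gem.get('planet', 'N/A')}: {gem.get('gemstone', 'N/A')} - {gem.get('note', '')}\n"
--         text += "\n"
--
--     # Mantras
--     mantras = remedy_list.get('mantras', [])
--     if mantras:
--         text += "MANTRAS:\n"
--         for mantra in mantras:
--             text += f"• {mantra.get('planet', 'N/A')}: {mantra.get('mantra', 'N/A')} - {mantra.get('note', '')}\n"
--         text += "\n"
--
--     # Pujas
--     pujas = remedy_list.get('pujas', [])
--     if pujas:
--         text += "PUJAS:\n"
--         for puja in pujas:
--             text += f"• {puja.get('planet', 'N/A')}: {puja.get('puja', 'N/A')}\n"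
--         text += "\n"
--
--     # Habits
--     habits = remedy_list.get('habits', [])
--     if habits:
--         text += "DAILY HABITS:\n"
--         for habit in habits:
--             text += f"• {habit.get('habit', 'N/A')}: {habit.get('frequency', 'N/A')} - {habit.get('benefit', '')}\n"
--         text += "\n"
--
--     # General
--     general = remedy_list.get('general', [])
--     if general:
--         text += "GENERAL REMEDIES:\n"
--         for gen in general:
--             text += f"• {gen.get('type', 'N/A')}: {gen.get('remedy', 'N/A')}\n"
--
--     text += "\nNote: Consult a qualified Vedic Astrologer before implementing remedies.\n"
--
--     return text.strip()
-- ===== SOURCE B (Python) =====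
-- from typing import Dict
--
-- # B builds the already-stripped report line-by-line (no strip(), no multiline
-- # literals): bullet lines come from a declarative field spec, and one '\n'.join
-- # at the end produces the exact output.
--
-- _BAR = "═" * 59
-- _NOTE = "Note: Consult a qualified Vedic Astrologer before implementing remedies."
--
-- # (dict key, header line, [(separator, item key, default)], trailing blank line?)
-- _SECTIONS = [
--     ("gemstones", "GEMSTONES:",
--      [("• ", "planet", "N/A"), (": ", "gemstone", "N/A"), (" - ", "note", "")], True),
--     ("mantras", "MANTRAS:",
--      [("• ", "planet", "N/A"), (": ", "mantra", "N/A"), (" - ", "note", "")], True),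
--     ("pujas", "PUJAS:",
--      [("• ", "planet", "N/A"), (": ", "puja", "N/A")], True),
--     ("habits", "DAILY HABITS:",
--      [("• ", "habit", "N/A"), (": ", "frequency", "N/A"), (" - ", "benefit", "")], True),
--     ("general", "GENERAL REMEDIES:",
--      [("• ", "type", "N/A"), (": ", "remedy", "N/A")], False),
-- ]
--
--
-- def format_remedies(remedy_list: Dict) -> str:
--     lines = [_BAR, "REMEDIES & RECOMMENDATIONS", _BAR, ""]
--     for key, header, spec, blank in _SECTIONS:
--         items = remedy_list.get(key, [])
--         if items:
--             lines.append(header)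
--             lines.extend("".join(sep + item.get(k, dflt) for sep, k, dflt in spec)
--                          for item in items)
--             if blank:
--                 lines.append("")
--     lines.append("")
--     lines.append(_NOTE)
--     return "\n".join(lines)
-- ===== Notes on version B (the rewrite author's own statement) =====
-- stated objective: alternative
-- what changed: Instead of accumulating newline-terminated blocks into one big string and calling .strip(), B constructs the already-stripped report as a list of lines (bullet lines generated from a declarative (separator,key,default) field spec per section) and emits it with a single '\n'.join; no strip, no multiline literals, no per-block string concatenation.
import Mathlib
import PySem

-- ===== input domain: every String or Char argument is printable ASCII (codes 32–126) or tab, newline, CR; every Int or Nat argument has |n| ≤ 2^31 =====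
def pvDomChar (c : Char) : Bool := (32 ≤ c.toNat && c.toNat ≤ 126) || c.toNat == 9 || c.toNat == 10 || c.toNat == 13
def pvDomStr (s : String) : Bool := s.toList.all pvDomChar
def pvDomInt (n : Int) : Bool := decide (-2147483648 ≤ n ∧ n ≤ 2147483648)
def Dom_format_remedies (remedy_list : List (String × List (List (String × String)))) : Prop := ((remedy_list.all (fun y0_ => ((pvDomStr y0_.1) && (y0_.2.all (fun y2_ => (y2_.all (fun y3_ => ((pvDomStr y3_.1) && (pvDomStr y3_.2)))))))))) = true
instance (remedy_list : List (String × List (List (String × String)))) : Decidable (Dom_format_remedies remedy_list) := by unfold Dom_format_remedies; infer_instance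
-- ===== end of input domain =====

-- B builds the already-stripped report as a list of LINES (bullet lines from a declarative
-- (separator, key, default) field spec) and emits one '\n'.join — no strip(), no block concatenation.
-- Same asymptotic cost; objective: alternative decomposition.

-- ===== PORT A =====
def fr_banner : List Char :=
  "\n═══════════════════════════════════════════════════════════\nREMEDIES & RECOMMENDATIONS\n═══════════════════════════════════════════════════════════\n\n".toList
def fr_noteA : List Char :=
  "\nNote: Consult a qualified Vedic Astrologer before implementing remedies.\n".toList

-- literal transliteration of A: text accumulated as List Char through five unrolled blocks, then .strip()
def format_remedies (remedy_list : List (String × List (List (String × String)))) : String :=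
  let text := fr_banner
  let gemstones := PySem.Dict.getD (PySem.Dict.ofList remedy_list) "gemstones" []
  let text := if gemstones.isEmpty then text else
    (gemstones.foldl (fun t gem =>
      t ++ ("• ".toList ++ ((PySem.Dict.ofList gem).getD "planet" "N/A").toList ++ ": ".toList
        ++ ((PySem.Dict.ofList gem).getD "gemstone" "N/A").toList ++ " - ".toList
        ++ ((PySem.Dict.ofList gem).getD "note" "").toList ++ "\n".toList))
      (text ++ "GEMSTONES:\n".toList)) ++ "\n".toList
  let mantras := PySem.Dict.getD (PySem.Dict.ofList remedy_list) "mantras" []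
  let text := if mantras.isEmpty then text else
    (mantras.foldl (fun t mantra =>
      t ++ ("• ".toList ++ ((PySem.Dict.ofList mantra).getD "planet" "N/A").toList ++ ": ".toList
        ++ ((PySem.Dict.ofList mantra).getD "mantra" "N/A").toList ++ " - ".toList
        ++ ((PySem.Dict.ofList mantra).getD "note" "").toList ++ "\n".toList))
      (text ++ "MANTRAS:\n".toList)) ++ "\n".toList
  let pujas := PySem.Dict.getD (PySem.Dict.ofList remedy_list) "pujas" []
  let text := if pujas.isEmpty then text else
    (pujas.foldl (fun t puja =>
      t ++ ("• ".toList ++ ((PySem.Dict.ofList puja).getD "planet" "N/A").toList ++ ": ".toList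
        ++ ((PySem.Dict.ofList puja).getD "puja" "N/A").toList ++ "\n".toList))
      (text ++ "PUJAS:\n".toList)) ++ "\n".toList
  let habits := PySem.Dict.getD (PySem.Dict.ofList remedy_list) "habits" []
  let text := if habits.isEmpty then text else
    (habits.foldl (fun t habit =>
      t ++ ("• ".toList ++ ((PySem.Dict.ofList habit).getD "habit" "N/A").toList ++ ": ".toList
        ++ ((PySem.Dict.ofList habit).getD "frequency" "N/A").toList ++ " - ".toList
        ++ ((PySem.Dict.ofList habit).getD "benefit" "").toList ++ "\n".toList))
      (text ++ "DAILY HABITS:\n".toList)) ++ "\n".toList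
  let general := PySem.Dict.getD (PySem.Dict.ofList remedy_list) "general" []
  let text := if general.isEmpty then text else
    general.foldl (fun t gen =>
      t ++ ("• ".toList ++ ((PySem.Dict.ofList gen).getD "type" "N/A").toList ++ ": ".toList
        ++ ((PySem.Dict.ofList gen).getD "remedy" "N/A").toList ++ "\n".toList))
      (text ++ "GENERAL REMEDIES:\n".toList)
  let text := text ++ fr_noteA
  String.ofList (PySem.Chars.strip text)

-- ===== PORT B =====
def fr_bar : List Char := List.replicate 59 '═'        -- "═" * 59
def fr_noteB : List Char :=
  "Note: Consult a qualified Vedic Astrologer before implementing remedies.".toList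

-- (dict key, header line, [(separator, item key, default)], trailing blank line?)
def fr_specs : List (String × List Char × List (List Char × String × String) × Bool) :=
  [ ("gemstones", "GEMSTONES:".toList,
      [("• ".toList, "planet", "N/A"), (": ".toList, "gemstone", "N/A"), (" - ".toList, "note", "")], true),
    ("mantras", "MANTRAS:".toList,
      [("• ".toList, "planet", "N/A"), (": ".toList, "mantra", "N/A"), (" - ".toList, "note", "")], true),
    ("pujas", "PUJAS:".toList,
      [("• ".toList, "planet", "N/A"), (": ".toList, "puja", "N/A")], true),
    ("habits", "DAILY HABITS:".toList,
      [("• ".toList, "habit", "N/A"), (": ".toList, "frequency", "N/A"), (" - ".toList, "benefit", "")], true),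
    ("general", "GENERAL REMEDIES:".toList,
      [("• ".toList, "type", "N/A"), (": ".toList, "remedy", "N/A")], false) ]

-- "".join(sep + item.get(k, dflt) for sep, k, dflt in spec)
def fr_line (spec : List (List Char × String × String)) (item : List (String × String)) : List Char :=
  PySem.Chars.join []
    (spec.map (fun p => p.1 ++ ((PySem.Dict.ofList item).getD p.2.1 p.2.2).toList))

def format_remedies_alt (remedy_list : List (String × List (List (String × String)))) : String :=
  let lines := fr_specs.foldl (fun acc sec =>
    let items := PySem.Dict.getD (PySem.Dict.ofList remedy_list) sec.1 []
    if items.isEmpty then acc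
    else acc ++ [sec.2.1] ++ items.map (fr_line sec.2.2.1)
           ++ (if sec.2.2.2 then [([] : List Char)] else []))
    [fr_bar, "REMEDIES & RECOMMENDATIONS".toList, fr_bar, []]
  let lines := lines ++ [[], fr_noteB]
  String.ofList (PySem.Chars.join "\n".toList lines)

-- ===== PRECONDITION & SPEC =====
def Spec_format_remedies (remedy_list : List (String × List (List (String × String)))) (out : String) : Prop := out = format_remedies_alt remedy_list
instance (remedy_list : List (String × List (List (String × String)))) (out : String) : Decidable (Spec_format_remedies remedy_list out) := by unfold Spec_format_remedies; infer_instance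

-- ===== CLAIM (what is proved, stated in full; the proofs are below) =====
def Claim_equal_format_remedies : Prop := ∀ (remedy_list : List (String × List (List (String × String)))), Dom_format_remedies remedy_list → Spec_format_remedies remedy_list (format_remedies remedy_list)

-- ===== LEMMAS AND PROOFS =====

-- '\n'.join(L ++ [x]) concatenates each earlier line with a trailing newline, then x
theorem join_nl_snoc (L : List (List Char)) (x : List Char) :
    PySem.Chars.join "\n".toList (L ++ [x])
      = (L.map (fun l => l ++ ['\n'])).flatten ++ x := by
  induction L with
  | nil => simp [PySem.Chars.join, List.intercalate]
  | cons a L ih =>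
    cases L with
    | nil => simp [PySem.Chars.join, List.intercalate, List.intersperse]
    | cons b M =>
      simp only [PySem.Chars.join, List.intercalate] at *
      simp [List.intersperse] at ih ⊢
      simp [ih]

theorem join_nil_eq_flatten (ps : List (List Char)) : PySem.Chars.join [] ps = ps.flatten := by
  induction ps with
  | nil => rfl
  | cons p ps ih =>
    cases ps with
    | nil => simp [PySem.Chars.join, List.intercalate]
    | cons q qs =>
      simp only [PySem.Chars.join, List.intercalate] at *
      simp [List.intersperse, ih]

-- one A-block (with trailing blank line) equals the flattening of B's newline-terminated lines
theorem block_eq (t : List Char) (items : List (List (String × String)))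
    (hdr : List Char) (fmt : List (String × String) → List Char) :
    (if items.isEmpty then t else
      (items.foldl (fun s x => s ++ (fmt x ++ ['\n'])) (t ++ (hdr ++ ['\n']))) ++ ['\n'])
      = t ++ ((if items.isEmpty then ([] : List (List Char))
              else [hdr] ++ items.map fmt ++ [[]]).map (fun l => l ++ ['\n'])).flatten := by
  cases h : items.isEmpty <;> simp [List.append_assoc, Function.comp_def]

-- same, for the 'general' section (no trailing blank line)
theorem block_eq_noblank (t : List Char) (items : List (List (String × String)))
    (hdr : List Char) (fmt : List (String × String) → List Char) :
    (if items.isEmpty then t else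
      items.foldl (fun s x => s ++ (fmt x ++ ['\n'])) (t ++ (hdr ++ ['\n'])))
      = t ++ ((if items.isEmpty then ([] : List (List Char))
              else [hdr] ++ items.map fmt).map (fun l => l ++ ['\n'])).flatten := by
  cases h : items.isEmpty <;> simp [List.append_assoc, Function.comp_def]

theorem lstrip_cons_space (c : Char) (xs : List Char) (h : PySem.Chars.isspace c = true) :
    PySem.Chars.lstrip (c :: xs) = PySem.Chars.lstrip xs := by
  simp [PySem.Chars.lstrip, List.dropWhile, h]

theorem lstrip_cons_nonspace (c : Char) (xs : List Char) (h : PySem.Chars.isspace c = false) :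
    PySem.Chars.lstrip (c :: xs) = c :: xs := by
  simp [PySem.Chars.lstrip, List.dropWhile, h]

theorem rstrip_snoc_space (c : Char) (xs : List Char) (h : PySem.Chars.isspace c = true) :
    PySem.Chars.rstrip (xs ++ [c]) = PySem.Chars.rstrip xs := by
  simp [PySem.Chars.rstrip, h]

theorem rstrip_snoc_nonspace (c : Char) (xs : List Char) (h : PySem.Chars.isspace c = false) :
    PySem.Chars.rstrip (xs ++ [c]) = xs ++ [c] := by
  simp [PySem.Chars.rstrip, h]

-- strip of '\n' + (nonspace-headed body ending in nonspace) + '\n' removes exactly the two sentinels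
theorem strip_sandwich (c d : Char) (xs : List Char)
    (hc : PySem.Chars.isspace c = false) (hd : PySem.Chars.isspace d = false) :
    PySem.Chars.strip ('\n' :: ((c :: xs) ++ [d, '\n'])) = c :: xs ++ [d] := by
  have hnl : PySem.Chars.isspace '\n' = true := by decide
  show PySem.Chars.rstrip (PySem.Chars.lstrip _) = _
  rw [lstrip_cons_space _ _ hnl]
  simp only [List.cons_append]
  rw [lstrip_cons_nonspace _ _ hc]
  have h1 : c :: (xs ++ [d, '\n']) = (c :: (xs ++ [d])) ++ ['\n'] := by simp
  rw [h1, rstrip_snoc_space _ _ hnl]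
  have h2 : c :: (xs ++ [d]) = (c :: xs) ++ [d] := by simp
  rw [h2, rstrip_snoc_nonspace _ _ hd]


-- B's generic bullet line, unfolded to plain appends
theorem fr_line_eq3 (s1 s2 s3 : List Char) (k1 k2 k3 d1 d2 d3 : String) (x : List (String × String)) :
    fr_line [(s1, k1, d1), (s2, k2, d2), (s3, k3, d3)] x
      = s1 ++ ((PySem.Dict.ofList x).getD k1 d1).toList
        ++ (s2 ++ ((PySem.Dict.ofList x).getD k2 d2).toList
        ++ (s3 ++ ((PySem.Dict.ofList x).getD k3 d3).toList)) := by
  simp [fr_line, join_nil_eq_flatten]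

theorem fr_line_eq2 (s1 s2 : List Char) (k1 k2 d1 d2 : String) (x : List (String × String)) :
    fr_line [(s1, k1, d1), (s2, k2, d2)] x
      = s1 ++ ((PySem.Dict.ofList x).getD k1 d1).toList
        ++ (s2 ++ ((PySem.Dict.ofList x).getD k2 d2).toList) := by
  simp [fr_line, join_nil_eq_flatten]

-- A's unrolled three-field bullet block (header "H:\n", fields k1/k2/k3) as a block_eq instance
theorem blockA3 (t : List Char) (items : List (List (String × String)))
    (hdr : List Char) (k1 k2 k3 d1 d2 d3 : String) :
    (if items.isEmpty then t else
      (items.foldl (fun u x =>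
        u ++ ("• ".toList ++ ((PySem.Dict.ofList x).getD k1 d1).toList ++ ": ".toList
          ++ ((PySem.Dict.ofList x).getD k2 d2).toList ++ " - ".toList
          ++ ((PySem.Dict.ofList x).getD k3 d3).toList ++ "\n".toList))
        (t ++ (hdr ++ ['\n']))) ++ "\n".toList)
      = t ++ ((if items.isEmpty then ([] : List (List Char))
              else [hdr] ++ items.map (fr_line [("• ".toList, k1, d1), (": ".toList, k2, d2), (" - ".toList, k3, d3)]) ++ [[]]).map (fun l => l ++ ['\n'])).flatten := by
  have hnl : "\n".toList = ['\n'] := by decide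
  have hf : (fun (u : List Char) x =>
        u ++ ("• ".toList ++ ((PySem.Dict.ofList x).getD k1 d1).toList ++ ": ".toList
          ++ ((PySem.Dict.ofList x).getD k2 d2).toList ++ " - ".toList
          ++ ((PySem.Dict.ofList x).getD k3 d3).toList ++ ['\n']))
      = (fun (u : List Char) x => u ++ (fr_line [("• ".toList, k1, d1), (": ".toList, k2, d2), (" - ".toList, k3, d3)] x ++ ['\n'])) := by
    funext u x
    simp [fr_line_eq3, List.append_assoc]
  rw [hnl, hf]
  exact block_eq t items hdr _

-- A's unrolled two-field bullet block, trailing blank variant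
theorem blockA2 (t : List Char) (items : List (List (String × String)))
    (hdr : List Char) (k1 k2 d1 d2 : String) :
    (if items.isEmpty then t else
      (items.foldl (fun u x =>
        u ++ ("• ".toList ++ ((PySem.Dict.ofList x).getD k1 d1).toList ++ ": ".toList
          ++ ((PySem.Dict.ofList x).getD k2 d2).toList ++ "\n".toList))
        (t ++ (hdr ++ ['\n']))) ++ "\n".toList)
      = t ++ ((if items.isEmpty then ([] : List (List Char))
              else [hdr] ++ items.map (fr_line [("• ".toList, k1, d1), (": ".toList, k2, d2)]) ++ [[]]).map (fun l => l ++ ['\n'])).flatten := by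
  have hnl : "\n".toList = ['\n'] := by decide
  have hf : (fun (u : List Char) x =>
        u ++ ("• ".toList ++ ((PySem.Dict.ofList x).getD k1 d1).toList ++ ": ".toList
          ++ ((PySem.Dict.ofList x).getD k2 d2).toList ++ ['\n']))
      = (fun (u : List Char) x => u ++ (fr_line [("• ".toList, k1, d1), (": ".toList, k2, d2)] x ++ ['\n'])) := by
    funext u x
    simp [fr_line_eq2, List.append_assoc]
  rw [hnl, hf]
  exact block_eq t items hdr _

-- A's 'general' block (two fields, no trailing blank)
theorem blockA2n (t : List Char) (items : List (List (String × String)))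
    (hdr : List Char) (k1 k2 d1 d2 : String) :
    (if items.isEmpty then t else
      items.foldl (fun u x =>
        u ++ ("• ".toList ++ ((PySem.Dict.ofList x).getD k1 d1).toList ++ ": ".toList
          ++ ((PySem.Dict.ofList x).getD k2 d2).toList ++ "\n".toList))
        (t ++ (hdr ++ ['\n'])))
      = t ++ ((if items.isEmpty then ([] : List (List Char))
              else [hdr] ++ items.map (fr_line [("• ".toList, k1, d1), (": ".toList, k2, d2)])).map (fun l => l ++ ['\n'])).flatten := by
  have hnl : "\n".toList = ['\n'] := by decide
  have hf : (fun (u : List Char) x =>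
        u ++ ("• ".toList ++ ((PySem.Dict.ofList x).getD k1 d1).toList ++ ": ".toList
          ++ ((PySem.Dict.ofList x).getD k2 d2).toList ++ ['\n']))
      = (fun (u : List Char) x => u ++ (fr_line [("• ".toList, k1, d1), (": ".toList, k2, d2)] x ++ ['\n'])) := by
    funext u x
    simp [fr_line_eq2, List.append_assoc]
  rw [hnl, hf]
  exact block_eq_noblank t items hdr _

set_option maxRecDepth 8000 in
set_option maxHeartbeats 2000000 in
-- strip of A's banner + middle + note = banner-without-leading-newline + middle + '\n' + bare note
theorem strip_combo (M : List Char) :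
    PySem.Chars.strip (fr_banner ++ M ++ fr_noteA)
      = (([fr_bar, "REMEDIES & RECOMMENDATIONS".toList, fr_bar, []].map (fun l => l ++ ['\n'])).flatten) ++ M ++ (['\n'] ++ fr_noteB) := by
  have hb : fr_banner = '\n' :: ('═' :: (fr_banner.drop 2)) := by decide
  have hn : fr_noteA = ('\n' :: (fr_noteB.dropLast ++ ['.'])) ++ ['\n'] := by decide
  have hshape : fr_banner ++ M ++ fr_noteA
      = '\n' :: (('═' :: (fr_banner.drop 2 ++ M ++ ('\n' :: fr_noteB.dropLast))) ++ ['.', '\n']) := by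
    rw [hb, hn]; simp [List.append_assoc]
  rw [hshape, strip_sandwich '═' '.' _ (by decide) (by decide)]
  have hpre : (([fr_bar, "REMEDIES & RECOMMENDATIONS".toList, fr_bar, []].map (fun l => l ++ ['\n'])).flatten) = '═' :: fr_banner.drop 2 := by decide
  have hnb : fr_noteB = fr_noteB.dropLast ++ ['.'] := by decide
  rw [hpre]
  conv_rhs => rw [hnb]
  simp [List.append_assoc]

theorem join_last2 (L : List (List Char)) :
    PySem.Chars.join "\n".toList (L ++ [[], fr_noteB])
      = (L.map (fun l => l ++ ['\n'])).flatten ++ (['\n'] ++ fr_noteB) := by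
  have h := join_nl_snoc (L ++ [[]]) fr_noteB
  have h2 : L ++ [[], fr_noteB] = (L ++ [([] : List Char)]) ++ [fr_noteB] := by simp
  rw [h2, h]
  simp

theorem strip_combo5 (M1 M2 M3 M4 M5 : List Char) :
    PySem.Chars.strip (fr_banner ++ (M1 ++ (M2 ++ (M3 ++ (M4 ++ (M5 ++ fr_noteA))))))
      = (([fr_bar, "REMEDIES & RECOMMENDATIONS".toList, fr_bar, []].map (fun l => l ++ ['\n'])).flatten)
        ++ (M1 ++ (M2 ++ (M3 ++ (M4 ++ (M5 ++ (['\n'] ++ fr_noteB)))))) := by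
  have h := strip_combo (M1 ++ M2 ++ M3 ++ M4 ++ M5)
  simp only [List.append_assoc] at h ⊢
  exact h

-- ===== VERDICT (by name: the statement is the Claim_ definition above) =====
theorem format_remedies_spec : Claim_equal_format_remedies := by
  intro rl _
  show format_remedies rl = format_remedies_alt rl
  unfold format_remedies format_remedies_alt fr_specs
  simp only [List.foldl_cons, List.foldl_nil]
  rw [show ("GEMSTONES:\n".toList) = "GEMSTONES:".toList ++ ['\n'] from by decide,
     show ("MANTRAS:\n".toList) = "MANTRAS:".toList ++ ['\n'] from by decide,
     show ("PUJAS:\n".toList) = "PUJAS:".toList ++ ['\n'] from by decide,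
     show ("DAILY HABITS:\n".toList) = "DAILY HABITS:".toList ++ ['\n'] from by decide,
     show ("GENERAL REMEDIES:\n".toList) = "GENERAL REMEDIES:".toList ++ ['\n'] from by decide]
  rw [blockA3, blockA3, blockA2, blockA3, blockA2n]
  rw [join_last2]
  simp only [List.append_assoc]
  rw [strip_combo5]
  refine congrArg String.ofList ?_
  by_cases h1 : ((PySem.Dict.ofList rl).getD "gemstones" []).isEmpty <;>
    by_cases h2 : ((PySem.Dict.ofList rl).getD "mantras" []).isEmpty <;>
      by_cases h3 : ((PySem.Dict.ofList rl).getD "pujas" []).isEmpty <;>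
        by_cases h4 : ((PySem.Dict.ofList rl).getD "habits" []).isEmpty <;>
          by_cases h5 : ((PySem.Dict.ofList rl).getD "general" []).isEmpty <;>
            simp [h1, h2, h3, h4, h5, List.append_assoc]
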